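-- pv_equiv track=rewrite | github.com/RCRRTOW3R2/EPL_PROPHET | .history/model/frankenstein_ultimate_20250903163331.py | is_complacency_team
-- ===== SOURCE A (Python) =====
-- def is_complacency_team(recent_matches):
--     """Identify teams prone to complacency"""
--     # Teams with inconsistent results after good performances
--     if len(recent_matches) < 4:
--         return False
--
--     # Look for pattern: Win -> Poor result
--     inconsistent_count = 0
--     for i in range(len(recent_matches) - 1):
--         if recent_matches[i+1]['result'] == 'W' and recent_matches[i]['result'] == 'L':
--             inconsistent_count += 1
--
--     return inconsistent_count >= 2
-- ===== SOURCE B (Python) =====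
-- def is_complacency_team(recent_matches):
--     """Identify teams prone to complacency"""
--     if len(recent_matches) < 4:
--         return False
--     # Encode the result sequence as one string over the alphabet {W, L, .}
--     # and count L->W adjacencies as non-overlapping 'LW' substrings
--     # ('LW' occurrences can never overlap, so the counts coincide).
--     s = ''.join(
--         'W' if m['result'] == 'W' else ('L' if m['result'] == 'L' else '.')
--         for m in recent_matches
--     )
--     return s.count('LW') >= 2
-- ===== Notes on version B (the rewrite author's own statement) =====
-- stated objective: simpler
-- what changed: Replaces the index-pair counting loop by encoding the result sequence as a W/L/. string and counting non-overlapping 'LW' substrings with str.count.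
import Mathlib
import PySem

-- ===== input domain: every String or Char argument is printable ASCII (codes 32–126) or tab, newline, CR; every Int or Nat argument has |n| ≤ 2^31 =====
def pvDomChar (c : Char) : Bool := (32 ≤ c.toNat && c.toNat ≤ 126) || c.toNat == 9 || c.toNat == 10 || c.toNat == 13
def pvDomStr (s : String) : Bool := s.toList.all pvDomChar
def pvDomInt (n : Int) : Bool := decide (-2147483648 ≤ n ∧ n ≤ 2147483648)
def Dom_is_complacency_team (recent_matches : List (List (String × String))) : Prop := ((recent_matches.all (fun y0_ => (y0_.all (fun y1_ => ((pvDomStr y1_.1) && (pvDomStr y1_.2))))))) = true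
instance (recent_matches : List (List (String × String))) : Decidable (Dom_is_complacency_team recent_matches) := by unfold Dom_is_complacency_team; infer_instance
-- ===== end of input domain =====

-- B replaces A's index-pair counting loop by encoding the result sequence as a W/L/. string
-- and counting non-overlapping 'LW' substrings (objective: simpler).

-- ===== PORT A =====
-- m['result'] : first-match association-list lookup; total via default "" (Pre_ excludes missing keys)
def pvResOf (m : List (String × String)) : String := PySem.Dict.getD ⟨m⟩ "result" ""

def is_complacency_team (recent_matches : List (List (String × String))) : Bool :=
  if recent_matches.length < 4 then false
  else
    let cnt : Int := (PySem.List.pyRange 0 ((recent_matches.length : Int) - 1)).foldl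
      (fun acc i =>
        if pvResOf (PySem.List.pyGetD recent_matches (i + 1) []) == "W"
            && pvResOf (PySem.List.pyGetD recent_matches i []) == "L"
        then acc + 1 else acc) 0
    decide (2 ≤ cnt)

-- ===== PORT B =====
-- the conditional expression 'W' if r=='W' else ('L' if r=='L' else '.') from Source B
def pvEncodeRes (r : String) : Char :=
  if r == "W" then 'W' else if r == "L" then 'L' else '.'

def is_complacency_team_alt (recent_matches : List (List (String × String))) : Bool :=
  if recent_matches.length < 4 then false
  else
    let s : String := String.ofList (recent_matches.map (fun m => pvEncodeRes (pvResOf m)))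
    decide (2 ≤ PySem.Str.count s "LW")

-- ===== PRECONDITION & SPEC =====
-- Pre_ excludes exactly the inputs where the Python raises KeyError: 4 or more matches
-- of which some match lacks a 'result' key (both A and B raise there).
def Pre_is_complacency_team (recent_matches : List (List (String × String))) : Prop :=
  recent_matches.length < 4 ∨ ∀ m ∈ recent_matches, ∃ kv ∈ m, kv.1 = "result"
instance (recent_matches : List (List (String × String))) : Decidable (Pre_is_complacency_team recent_matches) := by unfold Pre_is_complacency_team; infer_instance

def pvWitness_is_complacency_team : (List (List (String × String))) :=
  [[("result", "L")], [("result", "W")], [("result", "L")], [("result", "W")]]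

def Spec_is_complacency_team (recent_matches : List (List (String × String))) (out : Bool) : Prop := out = is_complacency_team_alt recent_matches
instance (recent_matches : List (List (String × String))) (out : Bool) : Decidable (Spec_is_complacency_team recent_matches out) := by unfold Spec_is_complacency_team; infer_instance

-- ===== CLAIM (what is proved, stated in full; the proofs are below) =====
def Claim_equal_is_complacency_team : Prop := ∀ (recent_matches : List (List (String × String))), Dom_is_complacency_team recent_matches → Pre_is_complacency_team recent_matches → Spec_is_complacency_team recent_matches (is_complacency_team recent_matches)

-- ===== LEMMAS AND PROOFS =====

-- number of adjacent positions with (this, next) = ("L", "W") — the common specification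
def pairCntS : List String → Nat
  | a :: b :: t => (if b = "W" ∧ a = "L" then 1 else 0) + pairCntS (b :: t)
  | _ => 0

def pairCntC : List Char → Nat
  | a :: b :: t => (if b = 'W' ∧ a = 'L' then 1 else 0) + pairCntC (b :: t)
  | _ => 0

theorem pyGetD_map {α β : Type} (f : α → β) (xs : List α) (i : Int) (d : α) :
    PySem.List.pyGetD (xs.map f) i (f d) = f (PySem.List.pyGetD xs i d) := by
  simp only [PySem.List.pyGetD, PySem.List.pyGet?, List.length_map, List.getElem?_map]
  cases PySem.List.pyIdx? xs.length i with
  | none => rfl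
  | some k => cases h : xs[k]? <;> simp [h]

theorem countP_range_pair (ys : List String) :
    (List.range (ys.length - 1)).countP
      (fun k => (ys.getD (k + 1) "" == "W") && (ys.getD k "" == "L")) = pairCntS ys := by
  induction ys with
  | nil => simp [pairCntS]
  | cons a t ih =>
    cases t with
    | nil => simp [pairCntS]
    | cons b u =>
      rw [show (a :: b :: u).length - 1 = u.length + 1 by simp]
      rw [List.range_succ_eq_map, List.countP_cons, List.countP_map]
      have h2 : (List.range ((b :: u).length - 1)).countP
          (fun k => ((b :: u).getD (k + 1) "" == "W") && ((b :: u).getD k "" == "L"))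
          = pairCntS (b :: u) := ih
      simp only [List.length_cons, Nat.add_sub_cancel] at h2
      rw [show pairCntS (a :: b :: u) = (if b = "W" ∧ a = "L" then 1 else 0) + pairCntS (b :: u) from rfl]
      rw [← h2]
      have hfun : ((fun k => ((a :: b :: u).getD (k + 1) "" == "W") && ((a :: b :: u).getD k "" == "L")) ∘ (· + 1))
          = fun k => ((b :: u).getD (k + 1) "" == "W") && ((b :: u).getD k "" == "L") := by
        funext k; simp
      rw [hfun]
      by_cases hb : b = "W" <;> by_cases ha : a = "L" <;>
        simp [hb, ha, Nat.add_comm]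

theorem countA (rm : List (List (String × String))) :
    (PySem.List.pyRange 0 ((rm.length : Int) - 1)).foldl
      (fun acc i =>
        if pvResOf (PySem.List.pyGetD rm (i + 1) []) == "W"
            && pvResOf (PySem.List.pyGetD rm i []) == "L"
        then acc + 1 else acc) (0 : Int)
      = (pairCntS (rm.map pvResOf) : Int) := by
  rw [PySem.List.foldl_if_add_one]
  rw [PySem.List.pyRange_one, List.countP_map]
  have hres : pvResOf ([] : List (String × String)) = "" := rfl
  have hmain : (List.range (((rm.length : Int) - 1) - 0).toNat).countP
      ((fun i => pvResOf (PySem.List.pyGetD rm (i + 1) []) == "W"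
          && pvResOf (PySem.List.pyGetD rm i []) == "L") ∘ (fun k : Nat => (0 : Int) + k))
      = pairCntS (rm.map pvResOf) := by
    rw [← countP_range_pair (rm.map pvResOf)]
    have hlen : (((rm.length : Int) - 1) - 0).toNat = (rm.map pvResOf).length - 1 := by
      rw [List.length_map]; omega
    rw [hlen]
    apply List.countP_congr
    intro k _
    have e1 : (0 : Int) + (k : Int) + 1 = ((k + 1 : Nat) : Int) := by omega
    have e2 : (0 : Int) + (k : Int) = ((k : Nat) : Int) := by omega
    have g1 : pvResOf (PySem.List.pyGetD rm ((0 : Int) + (k : Int) + 1) []) = (rm.map pvResOf).getD (k + 1) "" := by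
      rw [e1, ← hres, ← pyGetD_map pvResOf rm, PySem.List.pyGetD_natCast, hres]
    have g2 : pvResOf (PySem.List.pyGetD rm ((0 : Int) + (k : Int)) []) = (rm.map pvResOf).getD k "" := by
      rw [e2, ← hres, ← pyGetD_map pvResOf rm, PySem.List.pyGetD_natCast, hres]
    simp only [Function.comp_apply, g1, g2]
  rw [hmain]
  omega

theorem count_go_LW : ∀ (fuel : Nat) (cs : List Char) (acc : Nat), cs.length ≤ fuel →
    PySem.Chars.count.go ['L', 'W'] fuel cs acc = acc + pairCntC cs := by
  intro fuel
  induction fuel with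
  | zero =>
    intro cs acc h
    have : cs = [] := by cases cs <;> simp_all
    subst this; simp [PySem.Chars.count.go, pairCntC]
  | succ f ih =>
    intro cs acc h
    cases cs with
    | nil => simp [PySem.Chars.count.go, pairCntC]
    | cons c t =>
      rw [show PySem.Chars.count.go ['L', 'W'] (f + 1) (c :: t) acc
          = if ['L', 'W'].isPrefixOf (c :: t) then
              PySem.Chars.count.go ['L', 'W'] f (List.drop 2 (c :: t)) (acc + 1)
            else PySem.Chars.count.go ['L', 'W'] f t acc from by
        simp [PySem.Chars.count.go]]
      by_cases hp : ['L', 'W'].isPrefixOf (c :: t)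
      · -- prefix: c = 'L', t = 'W' :: u
        cases t with
        | nil =>
          rw [List.isPrefixOf_iff_prefix] at hp
          have := hp.length_le; simp only [List.length_cons, List.length_nil] at this; omega
        | cons d u =>
          simp [List.isPrefixOf] at hp
          obtain ⟨hc, hd⟩ := hp
          subst hc; subst hd
          simp only [show List.isPrefixOf ['L','W'] ('L' :: 'W' :: u) = true from rfl, if_true]
          rw [show List.drop 2 ('L' :: 'W' :: u) = u from rfl]
          rw [ih u (acc + 1) (by simp at h ⊢; omega)]
          have : pairCntC ('L' :: 'W' :: u) = 1 + pairCntC ('W' :: u) := by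
            simp [pairCntC]
          rw [this]
          have hwu : pairCntC ('W' :: u) = pairCntC u := by
            cases u with
            | nil => simp [pairCntC]
            | cons e v => simp [pairCntC]
          rw [hwu]; omega
      · rw [if_neg hp]
        rw [ih t acc (by simp at h; omega)]
        have : pairCntC (c :: t) = pairCntC t := by
          cases t with
          | nil => simp [pairCntC]
          | cons d u =>
            rw [show pairCntC (c :: d :: u) = (if d = 'W' ∧ c = 'L' then 1 else 0) + pairCntC (d :: u) from rfl]
            have hno : ¬ (d = 'W' ∧ c = 'L') := by
              rintro ⟨h1, h2⟩; subst h1; subst h2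
              exact hp (by simp [List.isPrefixOf])
            simp [hno]
        rw [this]

theorem countC_eq (cs : List Char) : PySem.Chars.count cs ['L', 'W'] = pairCntC cs := by
  rw [show PySem.Chars.count cs ['L', 'W'] = PySem.Chars.count.go ['L', 'W'] cs.length cs 0 from rfl]
  rw [count_go_LW cs.length cs 0 le_rfl]
  omega

theorem pairCntC_map (ys : List String) :
    pairCntC (ys.map pvEncodeRes) = pairCntS ys := by
  induction ys with
  | nil => rfl
  | cons a t ih =>
    cases t with
    | nil => rfl
    | cons b u =>
      have hiff : ∀ r : String, (pvEncodeRes r = 'W' ↔ r = "W") ∧ (pvEncodeRes r = 'L' ↔ r = "L") := by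
        intro r
        unfold pvEncodeRes
        by_cases h1 : r = "W" <;> by_cases h2 : r = "L" <;> simp_all
      rw [show (a :: b :: u).map pvEncodeRes
          = pvEncodeRes a :: pvEncodeRes b :: u.map pvEncodeRes from rfl]
      rw [show pairCntC (pvEncodeRes a :: pvEncodeRes b :: u.map pvEncodeRes)
          = (if pvEncodeRes b = 'W' ∧ pvEncodeRes a = 'L' then 1 else 0)
            + pairCntC (pvEncodeRes b :: u.map pvEncodeRes) from rfl]
      rw [show pairCntS (a :: b :: u) = (if b = "W" ∧ a = "L" then 1 else 0) + pairCntS (b :: u) from rfl]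
      have : pairCntC (pvEncodeRes b :: u.map pvEncodeRes) = pairCntS (b :: u) := by
        simpa using ih
      rw [this]
      congr 1
      simp [(hiff a).2, (hiff b).1]

-- ===== VERDICT (by name: the statement is the Claim_ definition above) =====
theorem is_complacency_team_spec : Claim_equal_is_complacency_team := by
  intro rm _ _
  unfold Spec_is_complacency_team is_complacency_team is_complacency_team_alt
  by_cases h : rm.length < 4
  · simp [h]
  · simp only [h]
    rw [countA rm]
    rw [PySem.Str.count_eq]
    have hs : (String.ofList (rm.map (fun m => pvEncodeRes (pvResOf m)))).toList
        = (rm.map pvResOf).map pvEncodeRes := by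
      simp [List.map_map]
    rw [hs, show ("LW" : String).toList = ['L', 'W'] from rfl, countC_eq, pairCntC_map]
    simp only [if_false, decide_eq_decide]
    omega
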